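-- pv_equiv track=rewrite | github.com/haoranli623/Magic-Unirig-Hybrid-Rigging | src/visualization.py | keyframe_indices
-- ===== SOURCE A (Python) =====
-- def keyframe_indices(n_frames: int) -> list[int]:
--     if n_frames <= 0:
--         return []
--     idx = [0, n_frames // 2, n_frames - 1]
--     out: list[int] = []
--     for i in idx:
--         if i not in out:
--             out.append(i)
--     return out
-- ===== SOURCE B (Python) =====
-- def keyframe_indices(n_frames: int) -> list[int]:
--     if n_frames <= 0:
--         return []
--     if n_frames == 1:
--         return [0]
--     if n_frames == 2:
--         return [0, 1]
--     return [0, n_frames // 2, n_frames - 1]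
-- ===== Notes on version B (the rewrite author's own statement) =====
-- stated objective: simpler
-- what changed: Replaces the dedup-append loop with direct case analysis on the frame count: the empty and the two smallest positive sizes are returned as explicit literals, and otherwise the first/middle/last triple is returned directly, since those three indices are strictly increasing once there are at least three frames.
import Mathlib
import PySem

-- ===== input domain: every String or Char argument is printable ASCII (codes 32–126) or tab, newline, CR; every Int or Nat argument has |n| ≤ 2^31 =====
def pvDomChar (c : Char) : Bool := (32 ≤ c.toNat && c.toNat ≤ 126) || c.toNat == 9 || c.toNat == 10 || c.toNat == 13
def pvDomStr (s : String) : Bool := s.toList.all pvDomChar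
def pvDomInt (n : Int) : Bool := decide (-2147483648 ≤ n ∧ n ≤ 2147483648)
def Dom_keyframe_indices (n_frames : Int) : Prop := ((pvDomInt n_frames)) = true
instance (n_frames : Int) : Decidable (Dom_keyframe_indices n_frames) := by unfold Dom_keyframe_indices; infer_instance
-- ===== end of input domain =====

-- B replaces A's dedup-append loop with direct case analysis on n_frames (simpler; same O(1) cost).

-- ===== PORT A =====
def keyframe_indices (n_frames : Int) : List Int :=
  if n_frames ≤ 0 then []
  else
    let idx : List Int := [0, PySem.Int.floordiv n_frames 2, n_frames - 1]
    idx.foldl (fun out i => if out.contains i then out else out ++ [i]) []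

-- ===== PORT B =====
def keyframe_indices_alt (n_frames : Int) : List Int :=
  if n_frames ≤ 0 then []
  else if n_frames = 1 then [0]
  else if n_frames = 2 then [0, 1]
  else [0, PySem.Int.floordiv n_frames 2, n_frames - 1]

-- ===== PRECONDITION & SPEC =====
def Spec_keyframe_indices (n_frames : Int) (out : List Int) : Prop := out = keyframe_indices_alt n_frames
instance (n_frames : Int) (out : List Int) : Decidable (Spec_keyframe_indices n_frames out) := by unfold Spec_keyframe_indices; infer_instance

-- ===== CLAIM (what is proved, stated in full; the proofs are below) =====
def Claim_equal_keyframe_indices : Prop := ∀ (n_frames : Int), Dom_keyframe_indices n_frames → Spec_keyframe_indices n_frames (keyframe_indices n_frames)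

-- ===== LEMMAS AND PROOFS =====

-- ===== VERDICT (by name: the statement is the Claim_ definition above) =====
theorem keyframe_indices_spec : Claim_equal_keyframe_indices := by
  intro n _
  unfold Spec_keyframe_indices keyframe_indices keyframe_indices_alt
  by_cases h0 : n ≤ 0
  · simp [h0]
  · rw [PySem.Int.floordiv_eq_ediv_of_pos (by omega)]
    by_cases h1 : n = 1
    · subst h1; decide
    · by_cases h2 : n = 2
      · subst h2; decide
      · have h3 : 3 ≤ n := by omega
        have hm1 : 1 ≤ n / 2 := by omega
        have hm2 : n / 2 ≤ n - 2 := by omega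
        have c1 : (([] : List Int).contains 0) = false := rfl
        have c2 : (([0] : List Int).contains (n / 2)) = false := by
          simp only [List.contains_cons, List.contains_nil, Bool.or_false,
            beq_eq_false_iff_ne, ne_eq]
          omega
        have c3 : (([0, n / 2] : List Int).contains (n - 1)) = false := by
          simp only [List.contains_cons, List.contains_nil, Bool.or_false,
            Bool.or_eq_false_iff, beq_eq_false_iff_ne, ne_eq]
          exact ⟨by omega, by omega⟩
        simp only [if_neg h0, if_neg h1, if_neg h2, List.foldl_cons, List.foldl_nil,
          c1, c2, c3, Bool.false_eq_true, if_false, List.nil_append, List.cons_append]
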